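-- pv_equiv track=rewrite | github.com/BitBrujo/gunny | generators/project_generator.py | extract_input_variables
-- ===== SOURCE A (Python) =====
-- from typing import Dict, List, Any
--
-- def extract_input_variables(agents: List[Dict[str, Any]], tasks: List[Dict[str, Any]]) -> List[str]:
--     """
--     Extract placeholder variables from agent and task descriptions.
--
--     Args:
--         agents: List of agent configurations
--         tasks: List of task configurations
--
--     Returns:
--         List of unique variable names found in {variable} format
--     """
--     variables = set()
--
--     # Check agent descriptions
--     for agent in agents:
--         for field in ["role", "goal", "backstory"]:
--             text = agent.get(field, "")
--             # Simple regex-like extraction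
--             parts = text.split("{")
--             for part in parts[1:]:
--                 if "}" in part:
--                     var = part.split("}")[0]
--                     variables.add(var)
--
--     # Check task descriptions
--     for task in tasks:
--         for field in ["description", "expected_output"]:
--             text = task.get(field, "")
--             parts = text.split("{")
--             for part in parts[1:]:
--                 if "}" in part:
--                     var = part.split("}")[0]
--                     variables.add(var)
--
--     return sorted(list(variables))
-- ===== SOURCE B (Python) =====
-- def extract_input_variables(agents, tasks):
--     """
--     Extract placeholder variables from agent and task descriptions.
--
--     Single character-level state-machine scan per text instead of split-based
--     parsing: a '{' (re)starts a candidate, a '}' closes it, anything else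
--     extends it.
--     """
--     texts = [agent.get(field, "") for agent in agents
--              for field in ("role", "goal", "backstory")]
--     texts += [task.get(field, "") for task in tasks
--               for field in ("description", "expected_output")]
--     variables = set()
--     for text in texts:
--         cur = None
--         for ch in text:
--             if ch == '{':
--                 cur = []
--             elif ch == '}':
--                 if cur is not None:
--                     variables.add(''.join(cur))
--                     cur = None
--             elif cur is not None:
--                 cur.append(ch)
--     return sorted(variables)
-- ===== Notes on version B (the rewrite author's own statement) =====
-- stated objective: alternative
-- what changed: Replaced A's per-text split-on-'{' followed by split-on-'}' parsing (which materialises intermediate part lists) by a single character-level state-machine scan of each text, and flattened A's duplicated agent/task loops into one pass over a gathered list of texts.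
import Mathlib
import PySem

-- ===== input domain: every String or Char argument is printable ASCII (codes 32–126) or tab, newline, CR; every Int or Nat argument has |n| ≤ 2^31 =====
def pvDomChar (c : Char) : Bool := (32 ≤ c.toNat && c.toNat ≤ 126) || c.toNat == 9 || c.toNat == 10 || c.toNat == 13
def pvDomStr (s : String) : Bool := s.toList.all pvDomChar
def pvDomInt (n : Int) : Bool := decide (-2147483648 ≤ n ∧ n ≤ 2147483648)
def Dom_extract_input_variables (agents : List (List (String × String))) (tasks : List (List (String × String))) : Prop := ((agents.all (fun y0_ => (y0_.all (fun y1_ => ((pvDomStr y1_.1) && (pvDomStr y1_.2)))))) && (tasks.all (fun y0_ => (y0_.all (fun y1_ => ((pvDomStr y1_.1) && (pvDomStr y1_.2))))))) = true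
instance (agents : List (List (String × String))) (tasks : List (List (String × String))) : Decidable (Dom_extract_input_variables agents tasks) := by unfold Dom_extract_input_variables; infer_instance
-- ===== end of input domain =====

-- B replaces A's split-on-"{" / split-on-"}" parsing of each text by a single
-- character-level state-machine scan (one pass, no intermediate part lists);
-- same return value, objective: alternative (no measured speed claim).

-- ===== PORT A =====
-- A's inner extraction (the loop body duplicated in A for agents and tasks):
-- parts = text.split("{"); for part in parts[1:]: if "}" in part: add(part.split("}")[0])
def pyExtractVarsA (vs : PySem.Set String) (text : String) : PySem.Set String :=
  ((PySem.Chars.splitOn text.toList ['{']).drop 1).foldl (fun vs part =>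
    if PySem.Chars.isIn ['}'] part then
      -- part.split("}")[0]: split always returns a nonempty list, so [0] is headD
      PySem.Set.add vs (String.ofList ((PySem.Chars.splitOn part ['}']).headD []))
    else vs) vs

def extract_input_variables (agents : List (List (String × String))) (tasks : List (List (String × String))) : List String :=
  let variables_ : PySem.Set String := PySem.Set.empty
  let variables_ := agents.foldl (fun vs agent =>
    (["role", "goal", "backstory"]).foldl (fun vs field =>
      pyExtractVarsA vs (PySem.Dict.getD (PySem.Dict.mk agent) field "")) vs) variables_
  let variables_ := tasks.foldl (fun vs task =>
    (["description", "expected_output"]).foldl (fun vs field =>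
      pyExtractVarsA vs (PySem.Dict.getD (PySem.Dict.mk task) field "")) vs) variables_
  PySem.List.sorted variables_ (fun x => x) false

-- ===== PORT B =====
-- B's state machine: cur = none (outside a candidate) or some buf (chars seen
-- since the last '{'); '{' (re)starts, '}' closes and adds, others extend.
def scanVars : List Char → Option (List Char) → PySem.Set String → PySem.Set String
  | [], _, vs => vs
  | c :: cs, cur, vs =>
    if c = '{' then scanVars cs (some []) vs
    else if c = '}' then
      match cur with
      | some buf => scanVars cs none (PySem.Set.add vs (String.ofList buf))
      | none => scanVars cs none vs
    else
      match cur with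
      | some buf => scanVars cs (some (buf ++ [c])) vs
      | none => scanVars cs none vs

def extract_input_variables_alt (agents : List (List (String × String))) (tasks : List (List (String × String))) : List String :=
  let texts :=
    (agents.flatMap (fun agent => (["role", "goal", "backstory"]).map (fun field =>
      PySem.Dict.getD (PySem.Dict.mk agent) field "")))
    ++ (tasks.flatMap (fun task => (["description", "expected_output"]).map (fun field =>
      PySem.Dict.getD (PySem.Dict.mk task) field "")))
  PySem.List.sorted (texts.foldl (fun vs t => scanVars t.toList none vs) PySem.Set.empty) (fun x => x) false

-- ===== PRECONDITION & SPEC =====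
def Spec_extract_input_variables (agents : List (List (String × String))) (tasks : List (List (String × String))) (out : List String) : Prop := out = extract_input_variables_alt agents tasks
instance (agents : List (List (String × String))) (tasks : List (List (String × String))) (out : List String) : Decidable (Spec_extract_input_variables agents tasks out) := by unfold Spec_extract_input_variables; infer_instance

-- ===== CLAIM (what is proved, stated in full; the proofs are below) =====
def Claim_equal_extract_input_variables : Prop := ∀ (agents : List (List (String × String))) (tasks : List (List (String × String))), Dom_extract_input_variables agents tasks → Spec_extract_input_variables agents tasks (extract_input_variables agents tasks)

-- ===== LEMMAS AND PROOFS =====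

-- recursive characterisation of splitting on a single character
def splitOnChar (c : Char) : List Char → List (List Char)
  | [] => [[]]
  | a :: rest => if a = c then [] :: splitOnChar c rest
                 else (splitOnChar c rest).modifyHead (a :: ·)

theorem splitOnChar_ne_nil (c : Char) (l : List Char) : splitOnChar c l ≠ [] := by
  cases l with
  | nil => simp [splitOnChar]
  | cons a rest =>
    simp only [splitOnChar]
    split_ifs
    · simp
    · cases h : splitOnChar c rest with
      | nil => exact absurd h (splitOnChar_ne_nil c rest)
      | cons x xs => simp

theorem splitOn_go_spec (c : Char) (l : List Char) : ∀ (fuel : Nat) (cur : List Char) (acc : List (List Char)),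
    l.length < fuel →
    PySem.Chars.splitOn.go [c] fuel l cur acc
      = acc.reverse ++ (splitOnChar c l).modifyHead (cur.reverse ++ ·) := by
  induction l with
  | nil =>
    intro fuel cur acc h
    match fuel with
    | fuel + 1 => simp [PySem.Chars.splitOn.go, splitOnChar]
  | cons a rest ih =>
    intro fuel cur acc h
    match fuel with
    | fuel + 1 =>
      rw [PySem.Chars.splitOn.go]
      by_cases hac : a = c
      · subst hac
        have hp : List.isPrefixOf [a] (a :: rest) = true := by simp [List.isPrefixOf]
        rw [if_pos hp]
        simp only [List.length_cons] at h
        simp only [List.length_cons, List.length_nil, Nat.zero_add, List.drop_succ_cons, List.drop_zero]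
        rw [ih fuel [] (cur.reverse :: acc) (by omega)]
        simp only [splitOnChar]
        cases hsp : splitOnChar a rest <;> simp
      · have hp : List.isPrefixOf [c] (a :: rest) = false := by
          simp [List.isPrefixOf]; exact fun hh => absurd hh.symm hac
        rw [if_neg (by simp [hp])]
        simp only [List.length_cons] at h
        rw [ih fuel (a :: cur) acc (by omega)]
        simp only [splitOnChar, if_neg hac]
        cases hsp : splitOnChar c rest with
        | nil => exact absurd hsp (splitOnChar_ne_nil c rest)
        | cons x xs => simp

theorem splitOn_singleton (c : Char) (l : List Char) :
    PySem.Chars.splitOn l [c] = splitOnChar c l := by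
  rw [PySem.Chars.splitOn, splitOn_go_spec c l (l.length + 1) [] [] (by omega)]
  cases h : splitOnChar c l with
  | nil => exact absurd h (splitOnChar_ne_nil c l)
  | cons x xs => simp

theorem headD_splitOnChar (c : Char) (l : List Char) :
    (splitOnChar c l).headD [] = l.takeWhile (fun a => !decide (a = c)) := by
  induction l with
  | nil => simp [splitOnChar]
  | cons a rest ih =>
    simp only [splitOnChar, List.takeWhile_cons]
    by_cases hac : a = c
    · simp [hac]
    · rw [if_neg hac]
      cases hsp : splitOnChar c rest with
      | nil => exact absurd hsp (splitOnChar_ne_nil c rest)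
      | cons x xs =>
        rw [hsp] at ih
        simp [hac, ih.symm]

theorem splitOnChar_decomp (c : Char) (l : List Char) :
    splitOnChar c l = l.takeWhile (fun a => !decide (a = c)) :: (splitOnChar c l).drop 1 := by
  cases h : splitOnChar c l with
  | nil => exact absurd h (splitOnChar_ne_nil c l)
  | cons x xs =>
    have := headD_splitOnChar c l
    rw [h] at this
    simp at this ⊢
    exact this

theorem isIn_singleton (a : Char) (l : List Char) :
    PySem.Chars.isIn [a] l = true ↔ a ∈ l := by
  rw [PySem.Chars.isIn_iff_infix]
  constructor
  · intro h; exact h.mem (by simp)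
  · intro h
    obtain ⟨p, q, rfl⟩ := List.append_of_mem h
    exact ⟨p, q, by simp⟩

-- A's inner loop body, with split-on-'}' already rewritten to takeWhile
def addVar (vs : PySem.Set String) (part : List Char) : PySem.Set String :=
  if '}' ∈ part then
    PySem.Set.add vs (String.ofList (part.takeWhile (fun a => !decide (a = '}'))))
  else vs

theorem pyExtractVarsA_eq_foldl (vs : PySem.Set String) (text : String) :
    pyExtractVarsA vs text = ((splitOnChar '{' text.toList).drop 1).foldl addVar vs := by
  unfold pyExtractVarsA
  rw [splitOn_singleton]
  congr 1
  funext vs part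
  unfold addVar
  by_cases h : '}' ∈ part
  · rw [if_pos ((isIn_singleton _ _).mpr h), if_pos h, splitOn_singleton, headD_splitOnChar]
  · rw [if_neg (by rw [← isIn_singleton '}' part] at h; simp [h]), if_neg h]

-- small step lemmas for splitOnChar and scanVars
theorem splitOnChar_cons_self (c : Char) (rest : List Char) :
    splitOnChar c (c :: rest) = [] :: splitOnChar c rest := by simp [splitOnChar]

theorem splitOnChar_cons_ne {a c : Char} (rest : List Char) (h : a ≠ c) :
    splitOnChar c (a :: rest) = (splitOnChar c rest).modifyHead (a :: ·) := by
  simp [splitOnChar, h]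

theorem drop1_splitOnChar_cons_ne {a c : Char} (rest : List Char) (h : a ≠ c) :
    (splitOnChar c (a :: rest)).drop 1 = (splitOnChar c rest).drop 1 := by
  rw [splitOnChar_cons_ne rest h]
  conv_lhs => rw [splitOnChar_decomp c rest]
  simp

theorem takeWhile_cons_self (rest : List Char) :
    (('{' :: rest)).takeWhile (fun a => !decide (a = '{')) = [] := by simp

theorem takeWhile_cons_ne {a : Char} (rest : List Char) (h : a ≠ '{') :
    ((a :: rest)).takeWhile (fun a => !decide (a = '{'))
      = a :: rest.takeWhile (fun a => !decide (a = '{')) := by simp [h]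

theorem addVar_no_close (vs : PySem.Set String) (part : List Char) (h : '}' ∉ part) :
    addVar vs part = vs := by rw [addVar, if_neg h]

theorem addVar_buf_close (vs : PySem.Set String) (buf tail : List Char) (h : '}' ∉ buf) :
    addVar vs (buf ++ '}' :: tail) = PySem.Set.add vs (String.ofList buf) := by
  rw [addVar, if_pos (by simp)]
  have hbuf : buf.takeWhile (fun a => !decide (a = '}')) = buf := by
    induction buf with
    | nil => rfl
    | cons x xs ihb =>
      simp only [List.mem_cons, not_or] at h
      have hx : ¬ x = '}' := fun hh => h.1 hh.symm
      simp [hx, ihb h.2]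
  congr 2
  rw [List.takeWhile_append, if_pos (by rw [hbuf])]
  simp

-- the main invariant: the state machine agrees with A's split-based parsing
theorem scan_eq (l : List Char) :
    (∀ vs, scanVars l none vs = ((splitOnChar '{' l).drop 1).foldl addVar vs) ∧
    (∀ buf vs, '{' ∉ buf → '}' ∉ buf →
      scanVars l (some buf) vs
        = ((splitOnChar '{' l).drop 1).foldl addVar
            (addVar vs (buf ++ l.takeWhile (fun a => !decide (a = '{'))))) := by
  induction l with
  | nil =>
    refine ⟨fun vs => by simp [scanVars, splitOnChar], fun buf vs h1 h2 => ?_⟩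
    simp only [scanVars, splitOnChar, List.takeWhile_nil, List.append_nil, List.drop_succ_cons,
      List.drop_nil, List.foldl_nil]
    rw [addVar_no_close vs buf h2]
  | cons a rest ih =>
    have key : ∀ vs, scanVars rest (some []) vs
        = ((splitOnChar '{' rest).drop 1).foldl addVar
            (addVar vs (rest.takeWhile (fun a => !decide (a = '{')))) := by
      intro vs
      rw [ih.2 [] vs (by simp) (by simp)]
      simp
    constructor
    · intro vs
      by_cases hab : a = '{'
      · subst hab
        rw [show scanVars ('{' :: rest) none vs = scanVars rest (some []) vs from by
          simp [scanVars]]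
        rw [key vs, splitOnChar_cons_self]
        conv_rhs => rw [splitOnChar_decomp '{' rest]
        simp
      · rw [show scanVars (a :: rest) none vs = scanVars rest none vs from by
          by_cases hcb : a = '}' <;> simp [scanVars, hab, hcb]]
        rw [ih.1 vs, drop1_splitOnChar_cons_ne rest hab]
    · intro buf vs h1 h2
      by_cases hab : a = '{'
      · subst hab
        rw [show scanVars ('{' :: rest) (some buf) vs = scanVars rest (some []) vs from by
          simp [scanVars]]
        rw [key vs, splitOnChar_cons_self, takeWhile_cons_self, List.append_nil]
        conv_rhs => rw [splitOnChar_decomp '{' rest]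
        rw [addVar_no_close vs buf h2]
        simp
      · by_cases hcb : a = '}'
        · subst hcb
          rw [show scanVars ('}' :: rest) (some buf) vs
              = scanVars rest none (PySem.Set.add vs (String.ofList buf)) from by
            simp [scanVars]]
          rw [ih.1, drop1_splitOnChar_cons_ne rest hab, takeWhile_cons_ne rest hab,
            addVar_buf_close vs buf _ h2]
        · rw [show scanVars (a :: rest) (some buf) vs = scanVars rest (some (buf ++ [a])) vs from by
            simp [scanVars, hab, hcb]]
          rw [ih.2 (buf ++ [a]) vs (by simp [h1]; exact fun h => hab h.symm)
            (by simp [h2]; exact fun h => hcb h.symm)]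
          rw [drop1_splitOnChar_cons_ne rest hab, takeWhile_cons_ne rest hab]
          simp

-- per-text agreement, as an equation between the two loop bodies
theorem scan_eq_extract : pyExtractVarsA = fun vs t => scanVars t.toList none vs := by
  funext vs t
  rw [pyExtractVarsA_eq_foldl, (scan_eq t.toList).1]

-- ===== VERDICT (by name: the statement is the Claim_ definition above) =====
theorem extract_input_variables_spec : Claim_equal_extract_input_variables := by
  intro agents tasks _
  unfold Spec_extract_input_variables extract_input_variables extract_input_variables_alt
  simp only [List.foldl_append, List.foldl_flatMap, List.foldl_map, scan_eq_extract]
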